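-- pv_equiv track=rewrite | github.com/SymphonyIceAttack/pytoexe-use | python-files/1774288986962-rivy-main.py | detect_base
-- ===== SOURCE A (Python) =====
-- def detect_base(number_str):
--     number_str = str(number_str).strip().upper()
--
--     if number_str.startswith("0B"):
--         return 2, number_str[2:]
--     elif number_str.startswith("0O"):
--         return 8, number_str[2:]
--     elif number_str.startswith("0X"):
--         return 16, number_str[2:]
--     elif all(c in "01" for c in number_str):
--         return 2, number_str
--     elif all(c in "01234567" for c in number_str):
--         return 8, number_str
--     elif all(c in "0123456789" for c in number_str):
--         return 10, number_str
--     elif all(c in "0123456789ABCDEF" for c in number_str):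
--         return 16, number_str
--     else:
--         return None, number_str
-- ===== SOURCE B (Python) =====
-- def detect_base(number_str):
--     number_str = str(number_str).strip().upper()
--     if number_str.startswith("0B"):
--         return 2, number_str[2:]
--     if number_str.startswith("0O"):
--         return 8, number_str[2:]
--     if number_str.startswith("0X"):
--         return 16, number_str[2:]
--     digits = "0123456789ABCDEF"
--     m = -1
--     for c in number_str:
--         i = digits.find(c)
--         if i < 0:
--             return None, number_str
--         if i > m:
--             m = i
--     if m <= 1:
--         return 2, number_str
--     if m <= 7:
--         return 8, number_str
--     if m <= 9:
--         return 10, number_str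
--     return 16, number_str
-- ===== Notes on version B (the rewrite author's own statement) =====
-- stated objective: alternative
-- what changed: Replaces A's four separate all()-subset passes over the string by a single pass that tracks the maximum hex-digit index seen and maps it through the base thresholds (<=1 -> 2, <=7 -> 8, <=9 -> 10, else 16).
import Mathlib
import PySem

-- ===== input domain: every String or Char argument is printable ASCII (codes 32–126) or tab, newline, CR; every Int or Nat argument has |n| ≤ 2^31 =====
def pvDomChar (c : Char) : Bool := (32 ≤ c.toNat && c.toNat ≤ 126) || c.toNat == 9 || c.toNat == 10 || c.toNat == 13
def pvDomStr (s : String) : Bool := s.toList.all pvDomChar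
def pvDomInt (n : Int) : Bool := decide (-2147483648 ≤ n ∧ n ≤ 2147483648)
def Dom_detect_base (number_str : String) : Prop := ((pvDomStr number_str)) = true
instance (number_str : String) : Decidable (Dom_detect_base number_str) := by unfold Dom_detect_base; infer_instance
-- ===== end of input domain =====

-- B replaces A's four all()-subset passes by one pass tracking the maximum hex-digit index, mapped through base thresholds; alternative single-pass algorithm.


-- ===== PORT A =====
-- 'c in "01"' on a single character c is character membership; ported via List.contains.
def detect_base (number_str : String) : Option Int × String :=
  let s := PySem.Str.upper (PySem.Str.strip number_str)
  if PySem.Str.startswith s "0B" then (some 2, PySem.Str.slice s (some 2) none)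
  else if PySem.Str.startswith s "0O" then (some 8, PySem.Str.slice s (some 2) none)
  else if PySem.Str.startswith s "0X" then (some 16, PySem.Str.slice s (some 2) none)
  else if s.toList.all (fun c => ("01".toList).contains c) then (some 2, s)
  else if s.toList.all (fun c => ("01234567".toList).contains c) then (some 8, s)
  else if s.toList.all (fun c => ("0123456789".toList).contains c) then (some 10, s)
  else if s.toList.all (fun c => ("0123456789ABCDEF".toList).contains c) then (some 16, s)
  else (none, s)

-- ===== PORT B =====
-- the single pass of Source B: digits.find(c) per character, early None on a miss, running maximum m
def detectScan (digits : List Char) : List Char → Int → Option Int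
  | [], m => some m
  | c :: cs, m =>
    let i := PySem.Chars.find digits [c]
    if i < 0 then none
    else detectScan digits cs (if i > m then i else m)

def detect_base_alt (number_str : String) : Option Int × String :=
  let s := PySem.Str.upper (PySem.Str.strip number_str)
  if PySem.Str.startswith s "0B" then (some 2, PySem.Str.slice s (some 2) none)
  else if PySem.Str.startswith s "0O" then (some 8, PySem.Str.slice s (some 2) none)
  else if PySem.Str.startswith s "0X" then (some 16, PySem.Str.slice s (some 2) none)
  else
    match detectScan ("0123456789ABCDEF".toList) s.toList (-1) with
    | none => (none, s)
    | some m =>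
      if m ≤ 1 then (some 2, s)
      else if m ≤ 7 then (some 8, s)
      else if m ≤ 9 then (some 10, s)
      else (some 16, s)

-- ===== PRECONDITION & SPEC =====
def Spec_detect_base (number_str : String) (out : Option Int × String) : Prop := out = detect_base_alt number_str
instance (number_str : String) (out : Option Int × String) : Decidable (Spec_detect_base number_str out) := by unfold Spec_detect_base; infer_instance

-- ===== CLAIM (what is proved, stated in full; the proofs are below) =====
def Claim_equal_detect_base : Prop := ∀ (number_str : String), Dom_detect_base number_str → Spec_detect_base number_str (detect_base number_str)

-- ===== LEMMAS AND PROOFS =====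

-- index of c in the hex alphabet, as Source B computes it
def hexD : List Char := "0123456789ABCDEF".toList
def fnd (c : Char) : Int := PySem.Chars.find hexD [c]

theorem hexD_eq : hexD = ['0','1','2','3','4','5','6','7','8','9','A','B','C','D','E','F'] := by decide

theorem fnd_neg_of_not_mem {c : Char} (h : ¬ c ∈ hexD) : fnd c = -1 := by
  unfold fnd
  rw [PySem.Chars.find_eq_neg_one_iff]
  intro hinf
  exact h (by simpa using hinf.mem (by simp))

theorem fnd_mem_facts : ∀ c ∈ hexD,
    (0 ≤ fnd c) ∧
    (fnd c ≤ 1 ↔ c ∈ "01".toList) ∧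
    (fnd c ≤ 7 ↔ c ∈ "01234567".toList) ∧
    (fnd c ≤ 9 ↔ c ∈ "0123456789".toList) := by
  intro c hc
  rw [hexD_eq] at hc
  simp only [List.mem_cons, List.not_mem_nil, or_false] at hc
  rcases hc with rfl|rfl|rfl|rfl|rfl|rfl|rfl|rfl|rfl|rfl|rfl|rfl|rfl|rfl|rfl|rfl
  all_goals decide

theorem sub2 : ∀ c ∈ ("01".toList), c ∈ hexD := by
  intro c hc
  rw [show "01".toList = ['0','1'] from by decide] at hc
  simp only [List.mem_cons, List.not_mem_nil, or_false] at hc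
  rcases hc with rfl|rfl
  all_goals decide

theorem sub8 : ∀ c ∈ ("01234567".toList), c ∈ hexD := by
  intro c hc
  rw [show "01234567".toList = ['0','1','2','3','4','5','6','7'] from by decide] at hc
  simp only [List.mem_cons, List.not_mem_nil, or_false] at hc
  rcases hc with rfl|rfl|rfl|rfl|rfl|rfl|rfl|rfl
  all_goals decide

theorem sub10 : ∀ c ∈ ("0123456789".toList), c ∈ hexD := by
  intro c hc
  rw [show "0123456789".toList = ['0','1','2','3','4','5','6','7','8','9'] from by decide] at hc
  simp only [List.mem_cons, List.not_mem_nil, or_false] at hc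
  rcases hc with rfl|rfl|rfl|rfl|rfl|rfl|rfl|rfl|rfl|rfl
  all_goals decide

theorem scan_none {cs : List Char} (h : ¬ ∀ c ∈ cs, c ∈ hexD) (m : Int) :
    detectScan hexD cs m = none := by
  induction cs generalizing m with
  | nil => exact absurd (by simp) h
  | cons c cs ih =>
    by_cases hc : c ∈ hexD
    · have htail : ¬ ∀ x ∈ cs, x ∈ hexD := fun hall =>
        h (fun x hx => (List.mem_cons.mp hx).elim (fun e => e ▸ hc) (hall x))
      simp only [detectScan]
      split
      · rfl
      · exact ih htail _
    · simp only [detectScan]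
      rw [if_pos]
      have hn := fnd_neg_of_not_mem hc
      unfold fnd at hn
      omega

theorem scan_some {cs : List Char} (h : ∀ c ∈ cs, c ∈ hexD) (m : Int) (hm : 0 ≤ m + 1) :
    detectScan hexD cs m = some (cs.foldl (fun m c => max m (fnd c)) m) := by
  induction cs generalizing m with
  | nil => rfl
  | cons c cs ih =>
    have hc : c ∈ hexD := h c (by simp)
    have h0 : 0 ≤ fnd c := (fnd_mem_facts c hc).1
    simp only [detectScan]
    rw [if_neg (by unfold fnd at h0; omega)]
    have hmax : (if PySem.Chars.find hexD [c] > m then PySem.Chars.find hexD [c] else m)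
        = max m (fnd c) := by
      unfold fnd
      rcases le_or_gt (PySem.Chars.find hexD [c]) m with h' | h'
      · rw [if_neg (by omega)]; omega
      · rw [if_pos (by omega)]; omega
    rw [hmax, ih (fun x hx => h x (List.mem_cons_of_mem _ hx)) _
      (by have := le_max_left m (fnd c); omega)]
    simp [List.foldl]

theorem foldl_max_le {cs : List Char} {m k : Int} :
    cs.foldl (fun m c => max m (fnd c)) m ≤ k ↔ m ≤ k ∧ ∀ c ∈ cs, fnd c ≤ k := by
  induction cs generalizing m with
  | nil => simp
  | cons c cs ih =>
    simp only [List.foldl_cons, ih, max_le_iff]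
    constructor
    · rintro ⟨⟨h1, h2⟩, h3⟩
      refine ⟨h1, fun x hx => ?_⟩
      rcases List.mem_cons.mp hx with rfl | hx'
      exacts [h2, h3 x hx']
    · rintro ⟨h1, h2⟩
      exact ⟨⟨h1, h2 c (List.mem_cons_self ..)⟩, fun x hx => h2 x (List.mem_cons_of_mem _ hx)⟩

theorem mem_iff_of_all {L dig : List Char} (hall : ∀ c ∈ L, c ∈ hexD) (k : Int)
    (hk : -1 ≤ k)
    (hpt : ∀ c ∈ hexD, (fnd c ≤ k ↔ c ∈ dig)) :
    (L.foldl (fun m c => max m (fnd c)) (-1) ≤ k) ↔ (L.all (fun c => dig.contains c) = true) := by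
  rw [foldl_max_le, List.all_eq_true]
  constructor
  · rintro ⟨-, h⟩ c hc
    simpa using (hpt c (hall c hc)).mp (h c hc)
  · intro h
    exact ⟨hk, fun c hc => (hpt c (hall c hc)).mpr (by simpa using h c hc)⟩

-- ===== VERDICT (by name: the statement is the Claim_ definition above) =====
theorem detect_base_spec : Claim_equal_detect_base := by
  intro number_str _
  unfold Spec_detect_base detect_base detect_base_alt
  set s := PySem.Str.upper (PySem.Str.strip number_str) with hs
  by_cases h1 : PySem.Str.startswith s "0B" = true
  · rw [if_pos h1, if_pos h1]
  rw [if_neg h1, if_neg h1]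
  by_cases h2 : PySem.Str.startswith s "0O" = true
  · rw [if_pos h2, if_pos h2]
  rw [if_neg h2, if_neg h2]
  by_cases h3 : PySem.Str.startswith s "0X" = true
  · rw [if_pos h3, if_pos h3]
  rw [if_neg h3, if_neg h3]
  set L := s.toList with hL
  rw [show "0123456789ABCDEF".toList = hexD from rfl]
  by_cases hall : ∀ c ∈ L, c ∈ hexD
  · rw [scan_some hall (-1) (by omega)]
    dsimp only
    have e2 := mem_iff_of_all (dig := "01".toList) hall 1 (by omega)
      (fun c hc => ((fnd_mem_facts c hc).2.1))
    have e8 := mem_iff_of_all (dig := "01234567".toList) hall 7 (by omega)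
      (fun c hc => ((fnd_mem_facts c hc).2.2.1))
    have e10 := mem_iff_of_all (dig := "0123456789".toList) hall 9 (by omega)
      (fun c hc => ((fnd_mem_facts c hc).2.2.2))
    have e16 : L.all (fun c => hexD.contains c) = true := by
      rw [List.all_eq_true]
      intro c hc
      simpa only [List.contains_iff_mem] using hall c hc
    by_cases b2 : L.foldl (fun m c => max m (fnd c)) (-1) ≤ 1
    · rw [if_pos (e2.mp b2), if_pos b2]
    rw [if_neg (fun hb => b2 (e2.mpr hb)), if_neg b2]
    by_cases b8 : L.foldl (fun m c => max m (fnd c)) (-1) ≤ 7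
    · rw [if_pos (e8.mp b8), if_pos b8]
    rw [if_neg (fun hb => b8 (e8.mpr hb)), if_neg b8]
    by_cases b10 : L.foldl (fun m c => max m (fnd c)) (-1) ≤ 9
    · rw [if_pos (e10.mp b10), if_pos b10]
    rw [if_neg (fun hb => b10 (e10.mpr hb)), if_neg b10, if_pos e16]
  · rw [scan_none hall (-1)]
    dsimp only
    have mk : ∀ (dig : List Char), (∀ c ∈ dig, c ∈ hexD) →
        ¬ (L.all (fun c => dig.contains c) = true) := fun dig hsub hb =>
      hall fun c hc => hsub c (by simpa using (List.all_eq_true.mp hb c hc))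
    rw [if_neg (mk _ sub2), if_neg (mk _ sub8), if_neg (mk _ sub10),
      if_neg (mk _ (fun c hc => hc))]
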